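-- pv_equiv track=rewrite | github.com/nicofninja28/STARK_Infra_nico | lambda/helpers/convert_friendly_to_system.py | to_az_function_app_name
-- ===== SOURCE A (Python) =====
-- def to_az_function_app_name(name):
--     system_name = ''
--     whitelist = 'ABCDEFGHIJKLMNOPQRSTUVWXYZabcdefghijklmnopqrstuvwxyz_0123456789'
--
--     name = name.lower()
--     for char in name:
--         if char in whitelist:
--             system_name += char
--
--     return system_name
-- ===== SOURCE B (Python) =====
-- import re
--
-- _DROP = re.compile(r'[^a-z0-9_]')
--
-- def to_az_function_app_name(name):
--     return _DROP.sub('', name.lower())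
-- ===== Notes on version B (the rewrite author's own statement) =====
-- stated objective: idiomatic
-- what changed: The explicit loop with a whitelist membership test and string accumulator is replaced by a single regex substitution deleting every character outside [a-z0-9_] from the lowercased string.
import Mathlib
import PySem

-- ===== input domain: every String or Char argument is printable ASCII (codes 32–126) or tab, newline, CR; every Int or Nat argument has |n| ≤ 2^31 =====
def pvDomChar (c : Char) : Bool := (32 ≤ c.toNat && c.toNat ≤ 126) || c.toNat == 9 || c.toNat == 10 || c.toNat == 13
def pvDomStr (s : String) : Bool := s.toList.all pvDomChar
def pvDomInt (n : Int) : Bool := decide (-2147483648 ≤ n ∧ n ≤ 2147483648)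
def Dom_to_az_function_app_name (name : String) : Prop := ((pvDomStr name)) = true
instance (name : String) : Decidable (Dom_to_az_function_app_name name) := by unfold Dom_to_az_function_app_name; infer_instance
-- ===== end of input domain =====

-- B replaces A's explicit filtering loop by a single regex substitution (re.sub(r'[^a-z0-9_]', '', name.lower())); same cost, more idiomatic.

-- ===== PORT A =====
-- A: lowercase, then loop over the characters appending each one that occurs in the
-- whitelist string ('char in whitelist' for a single char = membership among its chars).
def to_az_function_app_name (name : String) : String :=
  let whitelist := "ABCDEFGHIJKLMNOPQRSTUVWXYZabcdefghijklmnopqrstuvwxyz_0123456789"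
  let name' := PySem.Str.lower name
  String.mk (name'.toList.foldl
    (fun acc char => if whitelist.toList.contains char then acc ++ [char] else acc) [])

-- ===== PORT B =====
-- B: regex r'[^a-z0-9_]' deleted from the lowered string = keep exactly the characters
-- of the class [a-z0-9_]; the class is ported as this Bool test (exact on all of Dom,
-- since all chars involved are ASCII code points compared by value).
def azClassChar (c : Char) : Bool := ('a' ≤ c && c ≤ 'z') || ('0' ≤ c && c ≤ '9') || c == '_'

def to_az_function_app_name_alt (name : String) : String :=
  String.mk ((PySem.Str.lower name).toList.filter azClassChar)

-- ===== PRECONDITION & SPEC =====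
def Spec_to_az_function_app_name (name : String) (out : String) : Prop := out = to_az_function_app_name_alt name
instance (name : String) (out : String) : Decidable (Spec_to_az_function_app_name name out) := by unfold Spec_to_az_function_app_name; infer_instance

-- ===== CLAIM (what is proved, stated in full; the proofs are below) =====
def Claim_equal_to_az_function_app_name : Prop := ∀ (name : String), Dom_to_az_function_app_name name → Spec_to_az_function_app_name name (to_az_function_app_name name)

-- ===== LEMMAS AND PROOFS =====

-- After lowercasing, membership in A's whitelist coincides with B's character class,
-- for every character arising from a domain (≤ code 126) character.
theorem az_point : ∀ n : Nat, n < 127 →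
    ("ABCDEFGHIJKLMNOPQRSTUVWXYZabcdefghijklmnopqrstuvwxyz_0123456789".toList.contains
        (PySem.Chars.lowerChar (Char.ofNat n)))
      = azClassChar (PySem.Chars.lowerChar (Char.ofNat n)) := by
  set_option maxRecDepth 10000 in decide

theorem az_point_char (d : Char) (hd : pvDomChar d = true) :
    ("ABCDEFGHIJKLMNOPQRSTUVWXYZabcdefghijklmnopqrstuvwxyz_0123456789".toList.contains
        (PySem.Chars.lowerChar d))
      = azClassChar (PySem.Chars.lowerChar d) := by
  have hlt : d.toNat < 127 := by
    simp only [pvDomChar, Bool.or_eq_true, Bool.and_eq_true, decide_eq_true_eq,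
      beq_iff_eq] at hd
    omega
  have := az_point d.toNat hlt
  rwa [Char.ofNat_toNat] at this

-- ===== VERDICT (by name: the statement is the Claim_ definition above) =====
theorem to_az_function_app_name_spec : Claim_equal_to_az_function_app_name := by
  intro name hdom
  unfold Spec_to_az_function_app_name to_az_function_app_name to_az_function_app_name_alt
  simp only
  rw [PySem.List.foldl_append_if_eq_filter, List.nil_append]
  congr 1
  apply List.filter_congr
  intro c hc
  have hc' : c ∈ PySem.Chars.lower name.toList := by
    rwa [PySem.Str.toList_lower] at hc
  simp only [PySem.Chars.lower, List.mem_map] at hc'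
  obtain ⟨d, hd, rfl⟩ := hc'
  have hdc : pvDomChar d = true := by
    have := hdom
    unfold Dom_to_az_function_app_name pvDomStr at this
    exact List.all_eq_true.mp this d hd
  exact az_point_char d hdc
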